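-- pv_equiv track=rewrite | github.com/xiaoxuanNLP/UCAS-NLP-homework | translate/utils.py | sequence_mask
-- ===== SOURCE A (Python) =====
-- def sequence_mask(ids,max_len):
--     mask = []
--     for i in range(max_len):
--         if i < len(ids):
--             mask.append(1)
--         else:
--             mask.append(0)
--
--     return mask
-- ===== SOURCE B (Python) =====
-- def sequence_mask(ids, max_len):
--     ones = min(len(ids), max_len)
--     zeros = max(0, max_len - len(ids))
--     return [1] * ones + [0] * zeros
-- ===== Notes on version B (the rewrite author's own statement) =====
-- stated objective: simpler
-- what changed: Replaces the per-index loop with its comparison branch by computing the two run lengths up front and concatenating [1]*ones + [0]*zeros.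
import Mathlib
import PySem

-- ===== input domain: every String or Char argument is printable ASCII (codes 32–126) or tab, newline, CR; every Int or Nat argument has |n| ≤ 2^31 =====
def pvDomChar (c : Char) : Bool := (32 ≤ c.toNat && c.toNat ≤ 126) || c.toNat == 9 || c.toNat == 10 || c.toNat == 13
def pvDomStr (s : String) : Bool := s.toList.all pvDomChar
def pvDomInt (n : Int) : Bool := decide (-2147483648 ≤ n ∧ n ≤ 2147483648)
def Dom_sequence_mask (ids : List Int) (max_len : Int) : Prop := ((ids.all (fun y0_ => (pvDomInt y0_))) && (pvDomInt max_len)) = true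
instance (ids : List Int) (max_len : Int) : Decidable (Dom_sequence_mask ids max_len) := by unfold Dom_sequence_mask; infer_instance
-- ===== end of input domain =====

-- B replaces A's per-index loop and branch by computing the two run lengths and concatenating two constant runs (simpler decomposition, same cost).

-- ===== PORT A =====
-- for i in range(max_len): mask.append(1 if i < len(ids) else 0)
def sequence_mask (ids : List Int) (max_len : Int) : List Int :=
  (PySem.List.pyRange 0 max_len 1).foldl
    (fun mask i => mask ++ [if i < (ids.length : Int) then 1 else 0]) []

-- ===== PORT B =====
-- ones = min(len(ids), max_len); zeros = max(0, max_len - len(ids)); [1]*ones + [0]*zeros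
def sequence_mask_alt (ids : List Int) (max_len : Int) : List Int :=
  let ones : Int := min (ids.length : Int) max_len
  let zeros : Int := max 0 (max_len - (ids.length : Int))
  List.replicate ones.toNat 1 ++ List.replicate zeros.toNat 0

-- ===== PRECONDITION & SPEC =====
def Spec_sequence_mask (ids : List Int) (max_len : Int) (out : List Int) : Prop := out = sequence_mask_alt ids max_len
instance (ids : List Int) (max_len : Int) (out : List Int) : Decidable (Spec_sequence_mask ids max_len out) := by unfold Spec_sequence_mask; infer_instance

-- ===== CLAIM (what is proved, stated in full; the proofs are below) =====
def Claim_equal_sequence_mask : Prop := ∀ (ids : List Int) (max_len : Int), Dom_sequence_mask ids max_len → Spec_sequence_mask ids max_len (sequence_mask ids max_len)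

-- ===== LEMMAS AND PROOFS =====

-- the 0/1 indicator map over range n splits into a run of ones then a run of zeros
theorem map_range_indicator (L n : Nat) :
    (List.range n).map (fun (k : Nat) => if (k : Int) < (L : Int) then (1 : Int) else 0)
      = List.replicate (min L n) 1 ++ List.replicate (n - L) 0 := by
  induction n with
  | zero => simp
  | succ n ih =>
    rw [List.range_succ, List.map_append, ih]
    by_cases h : n < L
    · have h1 : min L (n + 1) = min L n + 1 := by omega
      have h2 : min L n = n := by omega
      have h3 : n + 1 - L = 0 := by omega
      have h4 : n - L = 0 := by omega
      simp [h1, h2, h3, h4, List.replicate_succ' (n := n)]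
      omega
    · have h1 : min L (n + 1) = min L n := by omega
      have h2 : n + 1 - L = (n - L) + 1 := by omega
      have hi : ¬ ((n : Int) < (L : Int)) := by exact_mod_cast h
      simp [h1, h2, List.replicate_succ' (n := n - L)]
      omega

-- ===== VERDICT (by name: the statement is the Claim_ definition above) =====
theorem sequence_mask_spec : Claim_equal_sequence_mask := by
  intro ids max_len _
  unfold Spec_sequence_mask sequence_mask sequence_mask_alt
  rw [PySem.List.pyRange_one, List.foldl_map, PySem.List.foldl_append_singleton_eq_map,
      List.nil_append]
  simp only [Int.sub_zero, zero_add]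
  rw [map_range_indicator ids.length max_len.toNat]
  congr 1
  · congr 1; omega
  · congr 1; omega
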